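-- pv_equiv track=rewrite | github.com/matthew-maya-17/CSCI-1100-Computer-Science-1 | hw7_files/hw7_part1.py | autocorrect
-- ===== SOURCE A (Python) =====
-- alphabet = [ 'a', 'b', 'c', 'd', 'e', 'f', 'g', 'h', 'i', 'j', 'k', 'l', 'm', 'n', 'o', 'p', 'q', 'r', 's', 't', 'u', 'v', 'w', 'x', 'y', 'z']
--
-- def autocorrect(word, dictionary, keyboard):
--     possibilities = []
--     possibilities_sorted = []
--
--     if word in dictionary:
--         return [('FOUND', word)]
--     #drop
--     for letter_index in range(len(word)):
--         word_possibility = word[0:letter_index] + word[letter_index+1:len(word)]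
--         if word_possibility in dictionary and word_possibility not in possibilities:
--             possibilities.append(word_possibility)
--     #swap
--     for letter_index in range(len(word)-1):
--         word_option = word[0:letter_index] + word[letter_index+1] + word[letter_index] + word[letter_index+2:len(word)]
--         if word_option in dictionary and word_option not in possibilities:
--             possibilities.append(word_option)
--     #insert
--     for letter_index in range(len(word)+1):
--         for letter in alphabet:
--             possible_word = word[0:letter_index] + letter + word[letter_index:len(word)+1]
--             if possible_word in dictionary and possible_word not in possibilities:
--                 possibilities.append(possible_word)
--     #replace
--     for letter_index in range(len(word)):
--         for key in keyboard.keys():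
--             if word[letter_index] ==  key:
--                 for value in keyboard[key]:
--                     possible_replacement = word[0:letter_index] + value + word[letter_index+1:len(word)]
--                     if possible_replacement in dictionary and possible_replacement not in possibilities:
--                         possibilities.append(possible_replacement)
--     if possibilities != []:
--         for word in possibilities:
--             if (dictionary[word], word) not in possibilities_sorted:
--                 possibilities_sorted.append((dictionary[word], word))
--         possibilities_sorted = sorted(possibilities_sorted, reverse = True)
--         for index in range(len(possibilities_sorted)):
--             possibilities_sorted[index] = ('MATCH ' + str(index+1), possibilities_sorted[index][1])
--         if len(possibilities_sorted) > 3: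
--             possibilities_sorted = possibilities_sorted[0:3]
--         return possibilities_sorted
--     return[('NO MATCH', word)]
-- ===== SOURCE B (Python) =====
-- def autocorrect(word, dictionary, keyboard):
--     if word in dictionary:
--         return [('FOUND', word)]
--     n = len(word)
--
--     def reachable(cand):
--         m = len(cand)
--         # one deletion from word
--         if m == n - 1 and any(word[:i] + word[i + 1:] == cand for i in range(n)):
--             return True
--         # one adjacent transposition
--         if m == n and any(word[:i] + word[i + 1] + word[i] + word[i + 2:] == cand for i in range(n - 1)):
--             return True
--         # one insertion of a lowercase letter (= deleting one lowercase char of cand gives word)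
--         if m == n + 1 and any(cand[:j] + cand[j + 1:] == word and 'a' <= cand[j] <= 'z' for j in range(m)):
--             return True
--         # one keyboard replacement
--         for i in range(n):
--             for v in keyboard.get(word[i], []):
--                 if m == n - 1 + len(v) and word[:i] + v + word[i + 1:] == cand:
--                     return True
--         return False
--
--     matches = sorted(((dictionary[w], w) for w in dictionary if reachable(w)), reverse=True)
--     if not matches:
--         return [('NO MATCH', word)]
--     return [('MATCH ' + str(i + 1), w) for i, (_, w) in enumerate(matches[:3])]
-- ===== Notes on version B (the rewrite author's own statement) =====
-- stated objective: alternative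
-- what changed: Instead of generating every edit-distance-1 candidate and looking each up in the dictionary with list-based dedup and a relabel-in-place pass, B scans the dictionary once and keeps the entries that satisfy a one-restricted-edit predicate (deletion / adjacent swap / lowercase insertion tested as a deletion from the candidate / keyboard replacement), then sorts the (frequency, word) pairs once, truncates to 3 and labels them.
import Mathlib
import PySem

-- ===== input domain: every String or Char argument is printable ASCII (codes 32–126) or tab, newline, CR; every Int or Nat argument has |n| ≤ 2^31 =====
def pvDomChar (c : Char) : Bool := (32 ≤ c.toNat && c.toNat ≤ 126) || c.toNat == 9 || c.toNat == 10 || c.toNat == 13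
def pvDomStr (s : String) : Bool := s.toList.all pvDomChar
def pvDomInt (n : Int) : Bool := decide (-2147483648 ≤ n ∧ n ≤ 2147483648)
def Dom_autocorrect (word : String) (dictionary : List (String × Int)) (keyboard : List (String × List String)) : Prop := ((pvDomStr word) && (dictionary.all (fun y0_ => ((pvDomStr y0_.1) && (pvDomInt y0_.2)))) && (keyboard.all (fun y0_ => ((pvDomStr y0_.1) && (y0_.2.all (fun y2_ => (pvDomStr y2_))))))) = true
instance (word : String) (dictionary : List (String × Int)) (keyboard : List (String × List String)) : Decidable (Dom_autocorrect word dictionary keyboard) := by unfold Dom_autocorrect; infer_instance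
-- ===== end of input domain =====

-- B replaces A's generate-candidates-then-look-up strategy by a single scan of the dictionary with a
-- one-restricted-edit predicate, one sort of the (frequency, word) pairs, truncation, then labelling
-- (objective: alternative — a genuinely different traversal of the same search space, not claimed faster).

-- ===== PORT A =====
def pvAlphabet : List Char :=
  ['a','b','c','d','e','f','g','h','i','j','k','l','m','n','o','p','q','r','s','t','u','v','w','x','y','z']

-- the repeated Python pattern 'if cand in dictionary and cand not in possibilities: possibilities.append(cand)'
def pvAddIf (p : String → Bool) (acc : List String) (c : String) : List String :=
  if p c && !(List.contains acc c) then acc ++ [c] else acc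

-- '#drop' loop
def pvPass1 (p : String → Bool) (w : List Char) (acc : List String) : List String :=
  (PySem.List.pyRange 0 (w.length : Int)).foldl (fun acc i =>
    pvAddIf p acc (String.ofList (PySem.List.slice w (some 0) (some i) ++
      PySem.List.slice w (some (i+1)) (some (w.length : Int))))) acc

-- '#swap' loop
def pvPass2 (p : String → Bool) (w : List Char) (acc : List String) : List String :=
  (PySem.List.pyRange 0 ((w.length : Int) - 1)).foldl (fun acc i =>
    pvAddIf p acc (String.ofList (PySem.List.slice w (some 0) (some i) ++
      [PySem.List.pyGetD w (i+1) ' ', PySem.List.pyGetD w i ' '] ++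
      PySem.List.slice w (some (i+2)) (some (w.length : Int))))) acc

-- '#insert' loop
def pvPass3 (p : String → Bool) (w : List Char) (acc : List String) : List String :=
  (PySem.List.pyRange 0 ((w.length : Int) + 1)).foldl (fun acc i =>
    pvAlphabet.foldl (fun acc2 l =>
      pvAddIf p acc2 (String.ofList (PySem.List.slice w (some 0) (some i) ++ [l] ++
        PySem.List.slice w (some i) (some ((w.length : Int) + 1))))) acc) acc

-- '#replace' loop
def pvPass4 (p : String → Bool) (w : List Char) (kb : PySem.Dict String (List String))
    (acc : List String) : List String :=
  (PySem.List.pyRange 0 (w.length : Int)).foldl (fun acc i =>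
    kb.keys.foldl (fun acc2 key =>
      if String.ofList [PySem.List.pyGetD w i ' '] == key then
        (kb.getD key []).foldl (fun acc3 v =>
          pvAddIf p acc3 (String.ofList (PySem.List.slice w (some 0) (some i) ++ v.toList ++
            PySem.List.slice w (some (i+1)) (some (w.length : Int))))) acc2
      else acc2) acc) acc

-- the in-place relabelling loop 'possibilities_sorted[index] = ('MATCH ' + str(index+1), possibilities_sorted[index][1])'
-- is ported as an index map over the list it starts from: exact, because iteration index reads only its own
-- not-yet-overwritten entry (and the overwritten tuples change type, which a Lean list cannot do in place)
def autocorrect (word : String) (dictionary : List (String × Int)) (keyboard : List (String × List String)) : List (String × String) :=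
  let d := PySem.Dict.ofList dictionary
  let kb := PySem.Dict.ofList keyboard
  let w := word.toList
  if d.contains word then [("FOUND", word)]
  else
    let p : String → Bool := fun c => d.contains c
    let poss := pvPass4 p w kb (pvPass3 p w (pvPass2 p w (pvPass1 p w [])))
    if poss ≠ [] then
      let ps := poss.foldl (fun acc wd =>
        if List.contains acc (d.getD wd 0, wd) then acc else acc ++ [(d.getD wd 0, wd)]) []
      let ps2 := PySem.List.sorted ps (fun pr => toLex pr) true
      let ps3 := (PySem.List.pyRange 0 (ps2.length : Int)).map (fun i =>
        ("MATCH " ++ PySem.Int.toStr (i+1), (PySem.List.pyGetD ps2 i ((0:Int), "")).2))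
      if ps3.length > 3 then ps3.take 3 else ps3
    else [("NO MATCH", word)]

-- ===== PORT B =====
-- 'reachable(cand)' of Source B: cand is one restricted edit away from word
def pvReach (kb : PySem.Dict String (List String)) (word : String) (cand : String) : Bool :=
  let w := word.toList
  let n : Int := (w.length : Int)
  let cl := cand.toList
  (decide ((cl.length : Int) = n - 1) &&
    (PySem.List.pyRange 0 n).any fun i =>
      String.ofList (PySem.List.slice w none (some i) ++ PySem.List.slice w (some (i+1)) none) == cand) ||
  (decide ((cl.length : Int) = n) &&
    (PySem.List.pyRange 0 (n-1)).any fun i =>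
      String.ofList (PySem.List.slice w none (some i) ++
        [PySem.List.pyGetD w (i+1) ' ', PySem.List.pyGetD w i ' '] ++
        PySem.List.slice w (some (i+2)) none) == cand) ||
  (decide ((cl.length : Int) = n + 1) &&
    (PySem.List.pyRange 0 (cl.length : Int)).any fun j =>
      (String.ofList (PySem.List.slice cl none (some j) ++ PySem.List.slice cl (some (j+1)) none) == word) &&
      ('a' ≤ PySem.List.pyGetD cl j ' ' && PySem.List.pyGetD cl j ' ' ≤ 'z')) ||
  ((PySem.List.pyRange 0 n).any fun i =>
      (kb.getD (String.ofList [PySem.List.pyGetD w i ' ']) []).any fun v =>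
        decide ((cl.length : Int) = n - 1 + v.toList.length) &&
        (String.ofList (PySem.List.slice w none (some i) ++ v.toList ++
          PySem.List.slice w (some (i+1)) none) == cand))

def autocorrect_alt (word : String) (dictionary : List (String × Int)) (keyboard : List (String × List String)) : List (String × String) :=
  let d := PySem.Dict.ofList dictionary
  let kb := PySem.Dict.ofList keyboard
  if d.contains word then [("FOUND", word)]
  else
    let ms := PySem.List.sorted
      ((d.keys.filter (fun k => pvReach kb word k)).map (fun k => (d.getD k 0, k)))
      (fun pr => toLex pr) true
    if ms.isEmpty then [("NO MATCH", word)]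
    else (PySem.List.enumerate (ms.take 3)).map
      (fun iv => ("MATCH " ++ PySem.Int.toStr (iv.1 + 1), iv.2.2))

-- ===== PRECONDITION & SPEC =====
def Spec_autocorrect (word : String) (dictionary : List (String × Int)) (keyboard : List (String × List String)) (out : List (String × String)) : Prop := out = autocorrect_alt word dictionary keyboard
instance (word : String) (dictionary : List (String × Int)) (keyboard : List (String × List String)) (out : List (String × String)) : Decidable (Spec_autocorrect word dictionary keyboard out) := by unfold Spec_autocorrect; infer_instance

-- ===== CLAIM (what is proved, stated in full; the proofs are below) =====
def Claim_equal_autocorrect : Prop := ∀ (word : String) (dictionary : List (String × Int)) (keyboard : List (String × List String)), Dom_autocorrect word dictionary keyboard → Spec_autocorrect word dictionary keyboard (autocorrect word dictionary keyboard)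

-- ===== LEMMAS AND PROOFS =====

-- the four restricted-edit shapes, over character lists with Nat positions
def GDel (w : List Char) (c : String) : Prop :=
  ∃ k < w.length, c = String.ofList (w.take k ++ w.drop (k+1))
def GSwp (w : List Char) (c : String) : Prop :=
  ∃ k, k + 1 < w.length ∧
    c = String.ofList (w.take k ++ [w.getD (k+1) ' ', w.getD k ' '] ++ w.drop (k+2))
def GIns (w : List Char) (c : String) : Prop :=
  ∃ k ≤ w.length, ∃ l ∈ pvAlphabet, c = String.ofList (w.take k ++ l :: w.drop k)
def GRep (kb : PySem.Dict String (List String)) (w : List Char) (c : String) : Prop :=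
  ∃ k < w.length, ∃ v ∈ kb.getD (String.ofList [w.getD k ' ']) [],
    c = String.ofList (w.take k ++ v.toList ++ w.drop (k+1))

lemma pvMemFoldlStep {β : Type} (step : List String → β → List String) (gen : β → String → Prop)
    (h : ∀ a x c, c ∈ step a x ↔ c ∈ a ∨ gen x c) (xs : List β) (acc : List String) (c : String) :
    c ∈ xs.foldl step acc ↔ c ∈ acc ∨ ∃ x ∈ xs, gen x c := by
  induction xs generalizing acc with
  | nil => simp
  | cons x xs ih =>
    rw [List.foldl_cons, ih, h, List.exists_mem_cons_iff]
    tauto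
lemma pvNodupFoldlStep {β : Type} (step : List String → β → List String)
    (h : ∀ a x, a.Nodup → (step a x).Nodup) (xs : List β) (acc : List String)
    (ha : acc.Nodup) : (xs.foldl step acc).Nodup := by
  induction xs generalizing acc with
  | nil => exact ha
  | cons x xs ih => exact ih _ (h _ _ ha)
lemma pvMemAddIf (p : String → Bool) (a : List String) (c' c : String) :
    c ∈ pvAddIf p a c' ↔ c ∈ a ∨ (c = c' ∧ p c' = true) := by
  unfold pvAddIf
  split_ifs with hc
  · simp only [Bool.and_eq_true, Bool.not_eq_true', List.contains_eq_mem, decide_eq_false_iff_not] at hc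
    simp only [List.mem_append, List.mem_singleton]
    tauto
  · simp only [Bool.and_eq_true, Bool.not_eq_true', List.contains_eq_mem, decide_eq_false_iff_not,
      not_and, not_not] at hc
    constructor
    · tauto
    · rintro (h | ⟨rfl, hp⟩)
      · exact h
      · exact hc hp
lemma pvNodupAddIf (p : String → Bool) (a : List String) (c' : String) (h : a.Nodup) :
    (pvAddIf p a c').Nodup := by
  unfold pvAddIf
  split_ifs with hc
  · simp only [Bool.and_eq_true, Bool.not_eq_true', List.contains_eq_mem, decide_eq_false_iff_not] at hc
    simp only [List.nodup_append, List.nodup_singleton, true_and, h]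
    intro x hx
    simp only [List.mem_singleton, ne_eq, forall_eq]
    intro he
    subst he; exact hc.2 hx
  · exact h
lemma pvExistsInt (b : Int) (P : Int → Prop) :
    (∃ i, (0 ≤ i ∧ i < b) ∧ P i) ↔ ∃ k : Nat, k < b.toNat ∧ P (k : Int) := by
  constructor
  · rintro ⟨i, ⟨h0, hb⟩, hP⟩
    refine ⟨i.toNat, by omega, ?_⟩
    rwa [Int.toNat_of_nonneg h0]
  · rintro ⟨k, hk, hP⟩
    exact ⟨(k : Int), ⟨by positivity, by omega⟩, hP⟩
lemma pvSliceTo (w : List Char) (k : Nat) :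
    PySem.List.slice w (some 0) (some (k : Int)) = w.take k := by
  have h := PySem.List.slice_natCast w 0 k
  simp only [Nat.cast_zero, Nat.sub_zero, List.drop_zero] at h
  exact h
lemma pvSliceToNone (w : List Char) (k : Nat) :
    PySem.List.slice w none (some (k : Int)) = w.take k := by
  have h := PySem.List.slice_to w (b := (k : Int)) (by positivity)
  simp only [Int.toNat_natCast] at h
  exact h
lemma pvSliceFromTo (w : List Char) (k : Nat) (m : Int) (h : (w.length : Int) ≤ m) :
    PySem.List.slice w (some (k : Int)) (some m) = w.drop k := by
  have hm : m = ((m.toNat : Nat) : Int) := by omega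
  rw [hm, PySem.List.slice_natCast]
  exact List.take_of_length_le (by simp [List.length_drop]; omega)
lemma pvSliceFromNone (w : List Char) (k : Nat) :
    PySem.List.slice w (some (k : Int)) none = w.drop k := by
  have h := PySem.List.slice_from w (a := (k : Int)) (by positivity)
  simp only [Int.toNat_natCast] at h
  exact h
lemma pvCharLe (a b : Char) : a ≤ b ↔ a.toNat ≤ b.toNat := ge_iff_le

lemma pvMemAlphabet (l : Char) : l ∈ pvAlphabet ↔ ('a' ≤ l ∧ l ≤ 'z') := by
  have halpha : pvAlphabet = (List.range' 97 26).map Char.ofNat := by decide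
  have h97 : ('a').toNat = 97 := rfl
  have h122 : ('z').toNat = 122 := rfl
  rw [halpha, pvCharLe, pvCharLe, h97, h122]
  constructor
  · intro hl
    obtain ⟨n, hn, rfl⟩ := List.mem_map.1 hl
    rw [List.mem_range'_1] at hn
    have hv : n.isValidChar := Or.inl (by omega)
    rw [show (Char.ofNat n).toNat = n from by rw [Char.toNat_ofNat, if_pos hv]]
    omega
  · rintro ⟨h1, h2⟩
    refine List.mem_map.2 ⟨l.toNat, List.mem_range'_1.2 ⟨by omega, by omega⟩, Char.ofNat_toNat l⟩
lemma pvMemFoldAddIf {β : Type} (p : String → Bool) (f : β → String) (xs : List β)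
    (acc : List String) (c : String) :
    c ∈ xs.foldl (fun a x => pvAddIf p a (f x)) acc ↔
      c ∈ acc ∨ (p c = true ∧ ∃ x ∈ xs, c = f x) := by
  rw [pvMemFoldlStep _ (fun x c => c = f x ∧ p (f x) = true) (fun a x c => pvMemAddIf p a (f x) c)]
  constructor
  · rintro (h | ⟨x, hx, rfl, hp⟩)
    · exact Or.inl h
    · exact Or.inr ⟨hp, x, hx, rfl⟩
  · rintro (h | ⟨hp, x, hx, rfl⟩)
    · exact Or.inl h
    · exact Or.inr ⟨x, hx, rfl, hp⟩

lemma pvMemPass1 (p : String → Bool) (w : List Char) (acc : List String) (c : String) :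
    c ∈ pvPass1 p w acc ↔ c ∈ acc ∨ (p c = true ∧ GDel w c) := by
  unfold pvPass1
  rw [pvMemFoldAddIf]
  unfold GDel
  have : (∃ i ∈ PySem.List.pyRange 0 (w.length : Int), c = String.ofList
      (PySem.List.slice w (some 0) (some i) ++ PySem.List.slice w (some (i+1)) (some (w.length : Int)))) ↔
      (∃ k < w.length, c = String.ofList (w.take k ++ w.drop (k+1))) := by
    simp only [PySem.List.mem_pyRange_one]
    rw [show (∃ i, (0 ≤ i ∧ i < (w.length : Int)) ∧ c = String.ofList
        (PySem.List.slice w (some 0) (some i) ++ PySem.List.slice w (some (i+1)) (some (w.length : Int)))) ↔ _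
      from pvExistsInt _ _]
    constructor
    · rintro ⟨k, hk, hc⟩
      refine ⟨k, by omega, ?_⟩
      rwa [pvSliceTo, show ((k : Int) + 1) = ((k+1 : Nat) : Int) by push_cast; ring,
        pvSliceFromTo w (k+1) _ le_rfl] at hc
    · rintro ⟨k, hk, hc⟩
      refine ⟨k, by omega, ?_⟩
      rw [pvSliceTo, show ((k : Int) + 1) = ((k+1 : Nat) : Int) by push_cast; ring,
        pvSliceFromTo w (k+1) _ le_rfl]
      exact hc
  rw [this]
lemma pvMemPass2 (p : String → Bool) (w : List Char) (acc : List String) (c : String) :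
    c ∈ pvPass2 p w acc ↔ c ∈ acc ∨ (p c = true ∧ GSwp w c) := by
  unfold pvPass2
  rw [pvMemFoldAddIf]
  unfold GSwp
  have : (∃ i ∈ PySem.List.pyRange 0 ((w.length : Int) - 1), c = String.ofList
      (PySem.List.slice w (some 0) (some i) ++
        [PySem.List.pyGetD w (i+1) ' ', PySem.List.pyGetD w i ' '] ++
        PySem.List.slice w (some (i+2)) (some (w.length : Int)))) ↔
      (∃ k, k + 1 < w.length ∧ c = String.ofList
        (w.take k ++ [w.getD (k+1) ' ', w.getD k ' '] ++ w.drop (k+2))) := by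
    simp only [PySem.List.mem_pyRange_one]
    rw [pvExistsInt]
    constructor
    · rintro ⟨k, hk, hc⟩
      refine ⟨k, by omega, ?_⟩
      rwa [pvSliceTo, show ((k : Int) + 1) = ((k+1 : Nat) : Int) by push_cast; ring,
        show ((k : Int) + 2) = ((k+2 : Nat) : Int) by push_cast; ring,
        pvSliceFromTo w (k+2) _ le_rfl, PySem.List.pyGetD_natCast, PySem.List.pyGetD_natCast] at hc
    · rintro ⟨k, hk, hc⟩
      refine ⟨k, by omega, ?_⟩
      rw [pvSliceTo, show ((k : Int) + 1) = ((k+1 : Nat) : Int) by push_cast; ring,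
        show ((k : Int) + 2) = ((k+2 : Nat) : Int) by push_cast; ring,
        pvSliceFromTo w (k+2) _ le_rfl, PySem.List.pyGetD_natCast, PySem.List.pyGetD_natCast]
      exact hc
  rw [this]
lemma pvMemPass3 (p : String → Bool) (w : List Char) (acc : List String) (c : String) :
    c ∈ pvPass3 p w acc ↔ c ∈ acc ∨ (p c = true ∧ GIns w c) := by
  unfold pvPass3
  rw [pvMemFoldlStep _
    (fun i c => p c = true ∧ ∃ l ∈ pvAlphabet, c = String.ofList
      (PySem.List.slice w (some 0) (some i) ++ [l] ++
        PySem.List.slice w (some i) (some ((w.length : Int) + 1))))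
    (fun a i c => pvMemFoldAddIf p _ pvAlphabet a c)]
  unfold GIns
  have : (∃ i ∈ PySem.List.pyRange 0 ((w.length : Int) + 1), p c = true ∧ ∃ l ∈ pvAlphabet,
      c = String.ofList (PySem.List.slice w (some 0) (some i) ++ [l] ++
        PySem.List.slice w (some i) (some ((w.length : Int) + 1)))) ↔
      (p c = true ∧ ∃ k ≤ w.length, ∃ l ∈ pvAlphabet,
        c = String.ofList (w.take k ++ l :: w.drop k)) := by
    simp only [PySem.List.mem_pyRange_one]
    rw [pvExistsInt]
    constructor
    · rintro ⟨k, hk, hp, l, hl, hc⟩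
      refine ⟨hp, k, by omega, l, hl, ?_⟩
      rwa [pvSliceTo, pvSliceFromTo w k _ (by omega), List.append_assoc,
        List.singleton_append] at hc
    · rintro ⟨hp, k, hk, l, hl, hc⟩
      refine ⟨k, by omega, hp, l, hl, ?_⟩
      rw [pvSliceTo, pvSliceFromTo w k _ (by omega), List.append_assoc, List.singleton_append]
      exact hc
  rw [this]
lemma pvMemPass4 (p : String → Bool) (w : List Char) (kb : PySem.Dict String (List String))
    (acc : List String) (c : String) :
    c ∈ pvPass4 p w kb acc ↔ c ∈ acc ∨ (p c = true ∧ GRep kb w c) := by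
  unfold pvPass4
  have hinner : ∀ (a : List String) (i : Int) (c : String),
      c ∈ kb.keys.foldl (fun acc2 key =>
          if String.ofList [PySem.List.pyGetD w i ' '] == key then
            (kb.getD key []).foldl (fun acc3 v => pvAddIf p acc3 (String.ofList
              (PySem.List.slice w (some 0) (some i) ++ v.toList ++
               PySem.List.slice w (some (i+1)) (some (w.length : Int))))) acc2
          else acc2) a ↔
        c ∈ a ∨ ∃ key ∈ kb.keys, String.ofList [PySem.List.pyGetD w i ' '] = key ∧
          (p c = true ∧ ∃ v ∈ kb.getD key [], c = String.ofList
            (PySem.List.slice w (some 0) (some i) ++ v.toList ++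
             PySem.List.slice w (some (i+1)) (some (w.length : Int)))) := by
    intro a i c
    rw [pvMemFoldlStep _ (fun key c => String.ofList [PySem.List.pyGetD w i ' '] = key ∧
        (p c = true ∧ ∃ v ∈ kb.getD key [], c = String.ofList
          (PySem.List.slice w (some 0) (some i) ++ v.toList ++
           PySem.List.slice w (some (i+1)) (some (w.length : Int))))) ?_]
    intro a2 key c2
    by_cases hkey : (String.ofList [PySem.List.pyGetD w i ' '] == key) = true
    · rw [if_pos hkey, pvMemFoldAddIf]
      rw [beq_iff_eq] at hkey
      constructor
      · rintro (h | ⟨hp, v, hv, rfl⟩)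
        · exact Or.inl h
        · exact Or.inr ⟨hkey, hp, v, hv, rfl⟩
      · rintro (h | ⟨_, hp, v, hv, rfl⟩)
        · exact Or.inl h
        · exact Or.inr ⟨hp, v, hv, rfl⟩
    · rw [if_neg hkey]
      simp only [beq_iff_eq] at hkey
      constructor
      · exact Or.inl
      · rintro (h | ⟨he, _⟩)
        · exact h
        · exact absurd he hkey
  rw [pvMemFoldlStep _ _ hinner]
  unfold GRep
  have : (∃ i ∈ PySem.List.pyRange 0 (w.length : Int), ∃ key ∈ kb.keys,
      String.ofList [PySem.List.pyGetD w i ' '] = key ∧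
      (p c = true ∧ ∃ v ∈ kb.getD key [], c = String.ofList
        (PySem.List.slice w (some 0) (some i) ++ v.toList ++
         PySem.List.slice w (some (i+1)) (some (w.length : Int))))) ↔
      (p c = true ∧ ∃ k < w.length, ∃ v ∈ kb.getD (String.ofList [w.getD k ' ']) [],
        c = String.ofList (w.take k ++ v.toList ++ w.drop (k+1))) := by
    simp only [PySem.List.mem_pyRange_one]
    rw [pvExistsInt]
    constructor
    · rintro ⟨k, hk, key, hkeys, hkeyeq, hp, v, hv, hc⟩
      subst hkeyeq
      rw [PySem.List.pyGetD_natCast] at hv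
      refine ⟨hp, k, by omega, v, hv, ?_⟩
      rwa [pvSliceTo, show ((k : Int) + 1) = ((k+1 : Nat) : Int) by push_cast; ring,
        pvSliceFromTo w (k+1) _ le_rfl] at hc
    · rintro ⟨hp, k, hk, v, hv, hc⟩
      have hmem : String.ofList [w.getD k ' '] ∈ kb.keys := by
        by_cases hcont : kb.contains (String.ofList [w.getD k ' ']) = true
        · exact (PySem.Dict.contains_iff_mem_keys _ _).1 hcont
        · rw [PySem.Dict.getD_of_not_contains _ _ (by simpa using hcont)] at hv
          exact absurd hv (List.not_mem_nil)
      refine ⟨k, by omega, String.ofList [w.getD k ' '], hmem,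
        by rw [PySem.List.pyGetD_natCast], hp, v, hv, ?_⟩
      rw [pvSliceTo, show ((k : Int) + 1) = ((k+1 : Nat) : Int) by push_cast; ring,
        pvSliceFromTo w (k+1) _ le_rfl]
      exact hc
  rw [this]
lemma pvNodupPass1 (p : String → Bool) (w : List Char) (acc : List String) (h : acc.Nodup) :
    (pvPass1 p w acc).Nodup :=
  pvNodupFoldlStep _ (fun _ _ ha => pvNodupAddIf _ _ _ ha) _ _ h

lemma pvNodupPass2 (p : String → Bool) (w : List Char) (acc : List String) (h : acc.Nodup) :
    (pvPass2 p w acc).Nodup :=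
  pvNodupFoldlStep _ (fun _ _ ha => pvNodupAddIf _ _ _ ha) _ _ h

lemma pvNodupPass3 (p : String → Bool) (w : List Char) (acc : List String) (h : acc.Nodup) :
    (pvPass3 p w acc).Nodup :=
  pvNodupFoldlStep _
    (fun _ _ ha => pvNodupFoldlStep _ (fun _ _ ha2 => pvNodupAddIf _ _ _ ha2) _ _ ha) _ _ h

lemma pvNodupPass4 (p : String → Bool) (w : List Char) (kb : PySem.Dict String (List String))
    (acc : List String) (h : acc.Nodup) : (pvPass4 p w kb acc).Nodup := by
  refine pvNodupFoldlStep _ (fun a i ha => ?_) _ _ h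
  refine pvNodupFoldlStep _ (fun a2 key ha2 => ?_) _ _ ha
  dsimp only
  split
  · exact pvNodupFoldlStep _ (fun _ _ ha3 => pvNodupAddIf _ _ _ ha3) _ _ ha2
  · exact ha2
-- inserting one alphabet letter into word ↔ deleting one lowercase position of cand gives word
lemma pvInsIff (w cl : List Char) :
    (∃ k ≤ w.length, ∃ l ∈ pvAlphabet, cl = w.take k ++ l :: w.drop k) ↔
    (∃ j < cl.length, cl.take j ++ cl.drop (j+1) = w ∧
      ('a' ≤ cl.getD j ' ' ∧ cl.getD j ' ' ≤ 'z')) := by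
  constructor
  · rintro ⟨k, hk, l, hl, rfl⟩
    have hlen : (w.take k).length = k := by simp [hk]
    have hsplit : w.take k ++ l :: w.drop k = (w.take k ++ [l]) ++ w.drop k := by simp
    have hlt : k < (w.take k ++ l :: w.drop k).length := by
      rw [List.length_append, hlen]; simp
    refine ⟨k, hlt, ?_, ?_⟩
    · have ht : (w.take k ++ l :: w.drop k).take k = w.take k := List.take_left' hlen
      have hd : (w.take k ++ l :: w.drop k).drop (k+1) = w.drop k := by
        rw [hsplit]; exact List.drop_left' (by simp [hlen])
      rw [ht, hd]
      exact List.take_append_drop k w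
    · have hget : (w.take k ++ l :: w.drop k).getD k ' ' = l := by
        rw [List.getD_eq_getElem?_getD, List.getElem?_append_right (by omega)]
        simp [hlen]
      rw [hget]
      exact (pvMemAlphabet l).1 hl
  · rintro ⟨j, hj, hw, h1, h2⟩
    have hdec : cl = cl.take j ++ cl.getD j ' ' :: cl.drop (j+1) := by
      conv_lhs => rw [← List.take_append_drop j cl]
      rw [List.drop_eq_getElem_cons hj, List.getD_eq_getElem?_getD, List.getElem?_eq_getElem hj]
      rfl
    have hlenj : (cl.take j).length = j := by simp; omega
    refine ⟨j, ?_, cl.getD j ' ', (pvMemAlphabet _).2 ⟨h1, h2⟩, ?_⟩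
    · rw [← hw]; simp; omega
    · rw [← hw, List.take_left' hlenj, List.drop_left' hlenj, ← hdec]
lemma pvStrEq (c : String) (X : List Char) : c = String.ofList X ↔ c.toList = X := by
  constructor
  · rintro rfl; exact String.toList_ofList
  · intro h; rw [← @String.ofList_toList c, h]

lemma pvLenDel (w : List Char) (c : String) (h : GDel w c) :
    (c.toList.length : Int) = (w.length : Int) - 1 := by
  obtain ⟨k, hk, rfl⟩ := h
  rw [String.toList_ofList]
  simp only [List.length_append, List.length_take, List.length_drop]
  rw [min_eq_left hk.le]
  push_cast
  omega

lemma pvLenSwp (w : List Char) (c : String) (h : GSwp w c) :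
    (c.toList.length : Int) = (w.length : Int) := by
  obtain ⟨k, hk, rfl⟩ := h
  rw [String.toList_ofList]
  simp only [List.length_append, List.length_take, List.length_drop, List.length_cons,
    List.length_nil]
  rw [min_eq_left (by omega : k ≤ w.length)]
  push_cast
  omega

lemma pvLenIns (w : List Char) (c : String) (h : GIns w c) :
    (c.toList.length : Int) = (w.length : Int) + 1 := by
  obtain ⟨k, hk, l, _, rfl⟩ := h
  rw [String.toList_ofList]
  simp only [List.length_append, List.length_take, List.length_drop, List.length_cons]
  rw [min_eq_left hk]
  push_cast
  omega

lemma pvReachIff (kb : PySem.Dict String (List String)) (word c : String) :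
    pvReach kb word c = true ↔
      (GDel word.toList c ∨ GSwp word.toList c ∨ GIns word.toList c ∨ GRep kb word.toList c) := by
  have hdel0 : ((PySem.List.pyRange 0 (word.toList.length : Int)).any fun i =>
      String.ofList (PySem.List.slice word.toList none (some i) ++
        PySem.List.slice word.toList (some (i+1)) none) == c) = true ↔ GDel word.toList c := by
    simp only [List.any_eq_true, PySem.List.mem_pyRange_one, beq_iff_eq]
    rw [pvExistsInt]
    unfold GDel
    constructor
    · rintro ⟨k, hk, hc⟩
      refine ⟨k, by omega, ?_⟩
      rw [pvSliceToNone, show ((k : Int) + 1) = ((k+1 : Nat) : Int) by push_cast; ring,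
        pvSliceFromNone] at hc
      exact hc.symm
    · rintro ⟨k, hk, hc⟩
      refine ⟨k, by omega, ?_⟩
      rw [pvSliceToNone, show ((k : Int) + 1) = ((k+1 : Nat) : Int) by push_cast; ring,
        pvSliceFromNone]
      exact hc.symm
  have hswp0 : ((PySem.List.pyRange 0 ((word.toList.length : Int) - 1)).any fun i =>
      String.ofList (PySem.List.slice word.toList none (some i) ++
        [PySem.List.pyGetD word.toList (i+1) ' ', PySem.List.pyGetD word.toList i ' '] ++
        PySem.List.slice word.toList (some (i+2)) none) == c) = true ↔ GSwp word.toList c := by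
    simp only [List.any_eq_true, PySem.List.mem_pyRange_one, beq_iff_eq]
    rw [pvExistsInt]
    unfold GSwp
    constructor
    · rintro ⟨k, hk, hc⟩
      refine ⟨k, by omega, ?_⟩
      rw [pvSliceToNone, show ((k : Int) + 1) = ((k+1 : Nat) : Int) by push_cast; ring,
        show ((k : Int) + 2) = ((k+2 : Nat) : Int) by push_cast; ring,
        pvSliceFromNone, PySem.List.pyGetD_natCast, PySem.List.pyGetD_natCast] at hc
      exact hc.symm
    · rintro ⟨k, hk, hc⟩
      refine ⟨k, by omega, ?_⟩
      rw [pvSliceToNone, show ((k : Int) + 1) = ((k+1 : Nat) : Int) by push_cast; ring,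
        show ((k : Int) + 2) = ((k+2 : Nat) : Int) by push_cast; ring,
        pvSliceFromNone, PySem.List.pyGetD_natCast, PySem.List.pyGetD_natCast]
      exact hc.symm
  have hins0 : ((PySem.List.pyRange 0 (c.toList.length : Int)).any fun j =>
      (String.ofList (PySem.List.slice c.toList none (some j) ++
        PySem.List.slice c.toList (some (j+1)) none) == word) &&
      ('a' ≤ PySem.List.pyGetD c.toList j ' ' && PySem.List.pyGetD c.toList j ' ' ≤ 'z')) = true
      ↔ GIns word.toList c := by
    simp only [List.any_eq_true, PySem.List.mem_pyRange_one, Bool.and_eq_true, beq_iff_eq,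
      decide_eq_true_eq]
    rw [pvExistsInt]
    unfold GIns
    constructor
    · rintro ⟨j, hj, hw, h1, h2⟩
      rw [pvSliceToNone, show ((j : Int) + 1) = ((j+1 : Nat) : Int) by push_cast; ring,
        pvSliceFromNone] at hw
      rw [PySem.List.pyGetD_natCast] at h1 h2
      have hw' : c.toList.take j ++ c.toList.drop (j+1) = word.toList := by
        rw [← hw, String.toList_ofList]
      obtain ⟨k, hk, l, hl, hcl⟩ := (pvInsIff word.toList c.toList).2 ⟨j, by omega, hw', h1, h2⟩
      exact ⟨k, hk, l, hl, (pvStrEq c _).2 hcl⟩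
    · rintro ⟨k, hk, l, hl, hc⟩
      obtain ⟨j, hj, hw', h1, h2⟩ := (pvInsIff word.toList c.toList).1
        ⟨k, hk, l, hl, (pvStrEq c _).1 hc⟩
      refine ⟨j, by omega, ?_, ?_, ?_⟩
      · rw [pvSliceToNone, show ((j : Int) + 1) = ((j+1 : Nat) : Int) by push_cast; ring,
          pvSliceFromNone, hw', String.ofList_toList]
      · rwa [PySem.List.pyGetD_natCast]
      · rwa [PySem.List.pyGetD_natCast]
  have hdel : (decide ((c.toList.length : Int) = (word.toList.length : Int) - 1) &&
      (PySem.List.pyRange 0 (word.toList.length : Int)).any fun i =>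
      String.ofList (PySem.List.slice word.toList none (some i) ++
        PySem.List.slice word.toList (some (i+1)) none) == c) = true ↔ GDel word.toList c := by
    rw [Bool.and_eq_true, decide_eq_true_eq, hdel0]
    exact ⟨fun h => h.2, fun h => ⟨pvLenDel _ _ h, h⟩⟩
  have hswp : (decide ((c.toList.length : Int) = (word.toList.length : Int)) &&
      (PySem.List.pyRange 0 ((word.toList.length : Int) - 1)).any fun i =>
      String.ofList (PySem.List.slice word.toList none (some i) ++
        [PySem.List.pyGetD word.toList (i+1) ' ', PySem.List.pyGetD word.toList i ' '] ++
        PySem.List.slice word.toList (some (i+2)) none) == c) = true ↔ GSwp word.toList c := by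
    rw [Bool.and_eq_true, decide_eq_true_eq, hswp0]
    exact ⟨fun h => h.2, fun h => ⟨pvLenSwp _ _ h, h⟩⟩
  have hins : (decide ((c.toList.length : Int) = (word.toList.length : Int) + 1) &&
      (PySem.List.pyRange 0 (c.toList.length : Int)).any fun j =>
      (String.ofList (PySem.List.slice c.toList none (some j) ++
        PySem.List.slice c.toList (some (j+1)) none) == word) &&
      ('a' ≤ PySem.List.pyGetD c.toList j ' ' && PySem.List.pyGetD c.toList j ' ' ≤ 'z')) = true
      ↔ GIns word.toList c := by
    rw [Bool.and_eq_true, decide_eq_true_eq, hins0]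
    exact ⟨fun h => h.2, fun h => ⟨pvLenIns _ _ h, h⟩⟩
  have hrep : ((PySem.List.pyRange 0 (word.toList.length : Int)).any fun i =>
      (kb.getD (String.ofList [PySem.List.pyGetD word.toList i ' ']) []).any fun v =>
        decide ((c.toList.length : Int) = (word.toList.length : Int) - 1 + v.toList.length) &&
        (String.ofList (PySem.List.slice word.toList none (some i) ++ v.toList ++
          PySem.List.slice word.toList (some (i+1)) none) == c)) = true ↔ GRep kb word.toList c := by
    simp only [List.any_eq_true, PySem.List.mem_pyRange_one, Bool.and_eq_true, decide_eq_true_eq,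
      beq_iff_eq]
    rw [pvExistsInt]
    unfold GRep
    constructor
    · rintro ⟨k, hk, v, hv, _, hc⟩
      rw [PySem.List.pyGetD_natCast] at hv
      refine ⟨k, by omega, v, hv, ?_⟩
      rw [pvSliceToNone, show ((k : Int) + 1) = ((k+1 : Nat) : Int) by push_cast; ring,
        pvSliceFromNone] at hc
      exact hc.symm
    · rintro ⟨k, hk, v, hv, hc⟩
      have hlen : (c.toList.length : Int) = (word.toList.length : Int) - 1 + v.toList.length := by
        rw [hc, String.toList_ofList]
        simp only [List.length_append, List.length_take, List.length_drop]
        rw [min_eq_left (by omega : k ≤ word.toList.length)]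
        push_cast
        omega
      refine ⟨k, by omega, v, by rwa [PySem.List.pyGetD_natCast], hlen, ?_⟩
      rw [pvSliceToNone, show ((k : Int) + 1) = ((k+1 : Nat) : Int) by push_cast; ring,
        pvSliceFromNone]
      exact hc.symm
  unfold pvReach
  rw [Bool.or_eq_true, Bool.or_eq_true, Bool.or_eq_true, hdel, hswp, hins, hrep,
    or_assoc, or_assoc]
lemma pvFoldPairs (d : PySem.Dict String Int) :
    ∀ (xs : List String) (acc : List (Int × String)), xs.Nodup → (∀ x ∈ xs, (d.getD x 0, x) ∉ acc) →
    xs.foldl (fun acc wd =>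
      if List.contains acc (d.getD wd 0, wd) then acc else acc ++ [(d.getD wd 0, wd)]) acc
      = acc ++ xs.map (fun wd => (d.getD wd 0, wd)) := by
  intro xs
  induction xs with
  | nil => intro acc _ _; simp
  | cons x xs ih =>
    intro acc hnd hacc
    rw [List.foldl_cons]
    have hnotin : List.contains acc (d.getD x 0, x) = false := by
      rw [List.contains_eq_mem, decide_eq_false_iff_not]
      exact hacc x (List.mem_cons_self)
    rw [hnotin]
    simp only [Bool.false_eq_true, if_false]
    rw [ih (acc ++ [(d.getD x 0, x)]) (List.Nodup.of_cons hnd) ?_]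
    · simp
    · intro y hy
      rw [List.mem_append]
      rintro (h | h)
      · exact hacc y (List.mem_cons_of_mem _ hy) h
      · rw [List.mem_singleton, Prod.mk.injEq] at h
        have : y = x := h.2
        subst this
        exact (List.nodup_cons.1 hnd).1 hy
lemma pvSortedRevPermEq {α κ : Type} [LinearOrder κ] (key : α → κ)
    (hinj : Function.Injective key) {l₁ l₂ : List α} (h : l₁.Perm l₂) :
    PySem.List.sorted l₁ key true = PySem.List.sorted l₂ key true := by
  have hp : (PySem.List.sorted l₁ key true).Perm (PySem.List.sorted l₂ key true) :=
    (PySem.List.sorted_perm l₁ key true).trans (h.trans (PySem.List.sorted_perm l₂ key true).symm)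
  have h1 := PySem.List.sorted_pairwise_rev l₁ key
  have h2 := PySem.List.sorted_pairwise_rev l₂ key
  have hr : (PySem.List.sorted l₁ key true).reverse = (PySem.List.sorted l₂ key true).reverse := by
    refine PySem.List.eq_of_perm_of_pairwise_le_of_injective key hinj
      ((((PySem.List.sorted l₁ key true).reverse_perm).trans hp).trans
        ((PySem.List.sorted l₂ key true).reverse_perm).symm) ?_ ?_
    · exact List.pairwise_reverse.2 h1
    · exact List.pairwise_reverse.2 h2
  simpa using congrArg List.reverse hr
lemma pvLabelEq (M : List (Int × String)) :
    (if ((PySem.List.pyRange 0 (M.length : Int)).map (fun i =>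
          ("MATCH " ++ PySem.Int.toStr (i+1), (PySem.List.pyGetD M i ((0:Int), "")).2))).length > 3
     then ((PySem.List.pyRange 0 (M.length : Int)).map (fun i =>
          ("MATCH " ++ PySem.Int.toStr (i+1), (PySem.List.pyGetD M i ((0:Int), "")).2))).take 3
     else (PySem.List.pyRange 0 (M.length : Int)).map (fun i =>
          ("MATCH " ++ PySem.Int.toStr (i+1), (PySem.List.pyGetD M i ((0:Int), "")).2)))
    = (PySem.List.enumerate (M.take 3)).map
        (fun iv => ("MATCH " ++ PySem.Int.toStr (iv.1 + 1), iv.2.2)) := by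
  have hlen : ((PySem.List.pyRange 0 (M.length : Int)).map (fun i =>
      ("MATCH " ++ PySem.Int.toStr (i+1), (PySem.List.pyGetD M i ((0:Int), "")).2))).length
      = M.length := by
    rw [PySem.List.pyRange_zero_natCast]
    simp
  have hif : (if ((PySem.List.pyRange 0 (M.length : Int)).map (fun i =>
          ("MATCH " ++ PySem.Int.toStr (i+1), (PySem.List.pyGetD M i ((0:Int), "")).2))).length > 3
      then ((PySem.List.pyRange 0 (M.length : Int)).map (fun i =>
          ("MATCH " ++ PySem.Int.toStr (i+1), (PySem.List.pyGetD M i ((0:Int), "")).2))).take 3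
      else (PySem.List.pyRange 0 (M.length : Int)).map (fun i =>
          ("MATCH " ++ PySem.Int.toStr (i+1), (PySem.List.pyGetD M i ((0:Int), "")).2)))
      = ((PySem.List.pyRange 0 (M.length : Int)).map (fun i =>
          ("MATCH " ++ PySem.Int.toStr (i+1), (PySem.List.pyGetD M i ((0:Int), "")).2))).take 3 := by
    split_ifs with h
    · rfl
    · rw [List.take_of_length_le (by omega)]
  rw [hif, PySem.List.enumerate_eq_map_pyRange (M.take 3) ((0:Int), "")]
  simp only [PySem.List.len]
  rw [List.map_map,
    PySem.List.pyRange_zero_natCast, PySem.List.pyRange_zero_natCast, List.map_map,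
    ← List.map_take, List.take_range, List.map_map]
  have hmin : (M.take 3).length = min 3 M.length := by simp
  rw [hmin]
  refine List.map_congr_left ?_
  intro k hk
  rw [List.mem_range] at hk
  simp only [Function.comp_apply, PySem.List.pyGetD_natCast]
  have hget : (M.take 3).getD k ((0:Int), "") = M.getD k ((0:Int), "") := by
    rw [List.getD_eq_getElem?_getD, List.getD_eq_getElem?_getD,
      List.getElem?_take_of_lt (by omega)]
  rw [hget]
-- ===== VERDICT (by name: the statement is the Claim_ definition above) =====
theorem autocorrect_spec : Claim_equal_autocorrect := by
  intro word dictionary keyboard _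
  unfold Spec_autocorrect
  simp only [autocorrect, autocorrect_alt]
  by_cases hf : (PySem.Dict.ofList dictionary).contains word = true
  · rw [if_pos hf, if_pos hf]
  · rw [if_neg hf, if_neg hf]
    set d := PySem.Dict.ofList dictionary with hd
    set kb := PySem.Dict.ofList keyboard with hkb
    set w := word.toList with hw
    set p : String → Bool := fun c => d.contains c with hp
    set poss := pvPass4 p w kb (pvPass3 p w (pvPass2 p w (pvPass1 p w []))) with hpossdef
    set reachL := d.keys.filter (fun k => pvReach kb word k) with hreachdef
    have hmem : ∀ c, c ∈ poss ↔ c ∈ reachL := by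
      intro c
      rw [hpossdef, pvMemPass4, pvMemPass3, pvMemPass2, pvMemPass1, hreachdef,
        List.mem_filter, pvReachIff]
      simp only [List.not_mem_nil, false_or]
      have hpc : p c = true ↔ c ∈ d.keys := by
        rw [hp]
        exact PySem.Dict.contains_iff_mem_keys d c
      constructor
      · rintro (((⟨hpc', hg⟩ | ⟨hpc', hg⟩) | ⟨hpc', hg⟩) | ⟨hpc', hg⟩)
        · exact ⟨hpc.1 hpc', Or.inl hg⟩
        · exact ⟨hpc.1 hpc', Or.inr (Or.inl hg)⟩
        · exact ⟨hpc.1 hpc', Or.inr (Or.inr (Or.inl hg))⟩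
        · exact ⟨hpc.1 hpc', Or.inr (Or.inr (Or.inr hg))⟩
      · rintro ⟨hk, (hg | hg | hg | hg)⟩
        · exact Or.inl (Or.inl (Or.inl ⟨hpc.2 hk, hg⟩))
        · exact Or.inl (Or.inl (Or.inr ⟨hpc.2 hk, hg⟩))
        · exact Or.inl (Or.inr ⟨hpc.2 hk, hg⟩)
        · exact Or.inr ⟨hpc.2 hk, hg⟩
    have hnodposs : poss.Nodup := by
      rw [hpossdef]
      exact pvNodupPass4 _ _ _ _ (pvNodupPass3 _ _ _ (pvNodupPass2 _ _ _
        (pvNodupPass1 _ _ _ List.nodup_nil)))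
    have hnodfil : reachL.Nodup := by
      rw [hreachdef]
      exact (PySem.Dict.nodup_keys_ofList dictionary).filter _
    have hperm : poss.Perm reachL := (List.perm_ext_iff_of_nodup hnodposs hnodfil).2 hmem
    have hinj : Function.Injective (fun pr : Int × String => toLex pr) := fun a b h => h
    have hsorted : PySem.List.sorted (poss.map (fun wd => (d.getD wd 0, wd)))
        (fun pr => toLex pr) true
        = PySem.List.sorted (reachL.map (fun k => (d.getD k 0, k))) (fun pr => toLex pr) true :=
      pvSortedRevPermEq _ hinj (hperm.map _)
    by_cases hposs : poss = []
    · have hfil : reachL = [] := by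
        have := hperm.length_eq
        rw [hposs] at this
        exact List.length_eq_zero_iff.1 this.symm
      have hBe : (PySem.List.sorted (reachL.map (fun k => (d.getD k 0, k)))
          (fun pr => toLex pr) true).isEmpty = true := by
        rw [List.isEmpty_iff, PySem.List.sorted_eq_nil_iff, List.map_eq_nil_iff]
        exact hfil
      rw [if_neg (show ¬ poss ≠ [] from fun hne => hne hposs), if_pos hBe]
    · rw [if_pos hposs]
      have hfil : reachL ≠ [] := by
        intro h
        exact hposs (List.length_eq_zero_iff.1 (by rw [hperm.length_eq, h]; rfl))
      have hBne : ¬ ((PySem.List.sorted (reachL.map (fun k => (d.getD k 0, k)))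
          (fun pr => toLex pr) true).isEmpty = true) := by
        rw [List.isEmpty_iff, PySem.List.sorted_eq_nil_iff, List.map_eq_nil_iff]
        exact hfil
      rw [if_neg hBne]
      rw [pvFoldPairs d poss [] hnodposs (by simp), List.nil_append, hsorted, pvLabelEq]
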